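-- pv_equiv track=rewrite | github.com/Kimuksung/algorithm | kakao/kakao_blind_2020_03_3.py | all_case_key
-- ===== SOURCE A (Python) =====
-- def rotate_90(key):
--     n = len(key)
--     arr = [[0 for i in range(n)] for _ in range(n)]
--     for r in range(n):
--         for c in range(n):
--             arr[c][n-1-r] = key[r][c]
--     return arr
--
-- def all_case_key(key):
--     arr = key
--     answer =[]
--     answer.append(arr)
--     for i in range(3):
--         arr = rotate_90(arr)
--         answer.append(arr)
--
--     return answer
-- ===== SOURCE B (Python) =====
-- def all_case_key(key):
--     n = len(key)
--     return [key,
--             [[key[n - 1 - j][i] for j in range(n)] for i in range(n)],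
--             [[key[n - 1 - i][n - 1 - j] for j in range(n)] for i in range(n)],
--             [[key[j][n - 1 - i] for j in range(n)] for i in range(n)]]
-- ===== Notes on version B (the rewrite author's own statement) =====
-- stated objective: simpler
-- what changed: B computes each of the four orientations directly from the original matrix by a closed index formula instead of A's chain of three in-place rotate_90 passes over zero-filled scratch arrays.
import Mathlib
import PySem

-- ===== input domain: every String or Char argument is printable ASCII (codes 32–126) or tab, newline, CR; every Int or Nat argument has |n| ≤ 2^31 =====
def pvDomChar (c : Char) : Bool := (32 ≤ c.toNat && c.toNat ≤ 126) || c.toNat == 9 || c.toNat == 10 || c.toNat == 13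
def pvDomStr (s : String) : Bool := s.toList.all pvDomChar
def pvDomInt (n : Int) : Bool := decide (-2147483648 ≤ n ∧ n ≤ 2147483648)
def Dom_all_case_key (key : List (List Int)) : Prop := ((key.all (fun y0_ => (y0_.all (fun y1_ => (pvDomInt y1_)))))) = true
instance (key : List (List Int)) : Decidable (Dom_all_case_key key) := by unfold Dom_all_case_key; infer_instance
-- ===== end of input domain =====

-- B replaces A's chain of three rotate_90 passes (each filling a zeroed scratch array
-- in-place) by four independent closed index formulas over the original matrix; same cost.

-- ===== PORT A =====
-- transliteration of rotate_90: zero-filled n×n array, then arr[c][n-1-r] = key[r][c]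
def rotate_90 (key : List (List Int)) : List (List Int) :=
  let n := key.length
  let arr := (List.range n).map (fun _ => (List.range n).map (fun _ => (0 : Int)))
  (List.range n).foldl (fun arr r =>
    (List.range n).foldl (fun arr c =>
      arr.set c ((arr.getD c []).set (n - 1 - r) ((key.getD r []).getD c 0))) arr) arr

def all_case_key (key : List (List Int)) : List (List (List Int)) :=
  let arr := key
  let answer : List (List (List Int)) := [arr]
  let p := (List.range 3).foldl
    (fun (p : List (List Int) × List (List (List Int))) _ =>
      let a := rotate_90 p.1
      (a, p.2 ++ [a])) (arr, answer)
  p.2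

-- ===== PORT B =====
def all_case_key_alt (key : List (List Int)) : List (List (List Int)) :=
  let n := key.length
  [key,
   (List.range n).map (fun i => (List.range n).map (fun j => (key.getD (n - 1 - j) []).getD i 0)),
   (List.range n).map (fun i => (List.range n).map (fun j => (key.getD (n - 1 - i) []).getD (n - 1 - j) 0)),
   (List.range n).map (fun i => (List.range n).map (fun j => (key.getD j []).getD (n - 1 - i) 0))]

-- ===== PRECONDITION & SPEC =====
-- Pre_ excludes exactly the inputs where Python A raises IndexError: some row shorter
-- than the number of rows (key[r][c] with c up to len(key)-1).  B raises there too.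
def Pre_all_case_key (key : List (List Int)) : Prop :=
  ∀ row ∈ key, key.length ≤ row.length
instance (key : List (List Int)) : Decidable (Pre_all_case_key key) := by
  unfold Pre_all_case_key; infer_instance
def pvWitness_all_case_key : List (List Int) := [[1, 2], [3, 4]]

def Spec_all_case_key (key : List (List Int)) (out : List (List (List Int))) : Prop := out = all_case_key_alt key
instance (key : List (List Int)) (out : List (List (List Int))) : Decidable (Spec_all_case_key key out) := by unfold Spec_all_case_key; infer_instance

-- ===== CLAIM (what is proved, stated in full; the proofs are below) =====
def Claim_equal_all_case_key : Prop := ∀ (key : List (List Int)), Dom_all_case_key key → Pre_all_case_key key → Spec_all_case_key key (all_case_key key)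

-- ===== LEMMAS AND PROOFS =====

theorem getD_set {α : Type} (d : α) (l : List α) (i : Nat) (v : α) (c : Nat) :
    (l.set i v).getD c d = if c = i ∧ i < l.length then v else l.getD c d := by
  simp only [List.getD_eq_getElem?_getD, List.getElem?_set]
  split_ifs with h1 h2 h3 <;> simp_all

theorem fold_set_length {α : Type} (d : α) (g : Nat → α → α) (m : Nat) (arr : List α) :
    ((List.range m).foldl (fun a c => a.set c (g c (a.getD c d))) arr).length = arr.length := by
  induction m with
  | zero => simp
  | succ m ih =>
      rw [List.range_succ, List.foldl_append]
      simp only [List.foldl_cons, List.foldl_nil, List.length_set]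
      exact ih

theorem fold_set_getD {α : Type} (d : α) (g : Nat → α → α) (m : Nat) (arr : List α) (c : Nat) :
    ((List.range m).foldl (fun a c => a.set c (g c (a.getD c d))) arr).getD c d
      = if c < m ∧ c < arr.length then g c (arr.getD c d) else arr.getD c d := by
  induction m generalizing c with
  | zero => simp
  | succ m ih =>
      rw [List.range_succ, List.foldl_append]
      simp only [List.foldl_cons, List.foldl_nil]
      rw [getD_set, fold_set_length, ih, ih]
      by_cases hc : c = m
      · subst hc
        by_cases hl : c < arr.length <;>
          simp [hl]
      · have h1 : (c < m + 1) ↔ (c < m) := by omega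
        simp [hc, h1]

def innerStep (key : List (List Int)) (arr : List (List Int)) (r : Nat) : List (List Int) :=
  (List.range key.length).foldl (fun arr c =>
    arr.set c ((arr.getD c []).set (key.length - 1 - r) ((key.getD r []).getD c 0))) arr

def F (key : List (List Int)) (m : Nat) : List (List Int) :=
  (List.range m).foldl (innerStep key)
    ((List.range key.length).map (fun _ => (List.range key.length).map (fun _ => (0 : Int))))

theorem getD_map_range {α : Type} (d : α) (f : Nat → α) (n a : Nat) (h : a < n) :
    ((List.range n).map f).getD a d = f a := by
  simp [List.getD_eq_getElem?_getD, h]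

theorem outer_char (key : List (List Int)) (m : Nat) (hm : m ≤ key.length) :
    (F key m).length = key.length ∧
    (∀ c, c < key.length → ((F key m).getD c []).length = key.length) ∧
    (∀ c k, c < key.length → k < key.length →
      ((F key m).getD c []).getD k 0 =
        if key.length - m ≤ k then (key.getD (key.length - 1 - k) []).getD c 0 else 0) := by
  induction m with
  | zero =>
      refine ⟨by simp [F], ?_, ?_⟩
      · intro c hc; rw [F]; simp only [List.range_zero, List.foldl_nil]
        rw [getD_map_range _ _ _ _ hc]; simp
      · intro c k hc hk; rw [F]; simp only [List.range_zero, List.foldl_nil]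
        rw [getD_map_range _ _ _ _ hc, getD_map_range _ _ _ _ hk]
        rw [if_neg (by omega)]
  | succ m ih =>
      have hm' : m ≤ key.length := by omega
      obtain ⟨L, RL, V⟩ := ih hm'
      have hF : F key (m+1) = innerStep key (F key m) m := by
        rw [F, List.range_succ, List.foldl_append]; rfl
      have hgD : ∀ c, (innerStep key (F key m) m).getD c [] =
          if c < key.length ∧ c < (F key m).length then
            ((F key m).getD c []).set (key.length - 1 - m) ((key.getD m []).getD c 0)
          else (F key m).getD c [] := fun c =>
        fold_set_getD [] (fun c row => row.set (key.length - 1 - m) ((key.getD m []).getD c 0))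
          key.length (F key m) c
      have hlen : (F key (m+1)).length = key.length := by
        rw [hF]
        exact (fold_set_length [] (fun c row => row.set (key.length - 1 - m)
          ((key.getD m []).getD c 0)) key.length (F key m)).trans L
      refine ⟨hlen, ?_, ?_⟩
      · intro c hc
        rw [hF, hgD c, L]
        simp only [hc, and_true, if_pos]
        rw [List.length_set]
        exact RL c hc
      · intro c k hc hk
        rw [hF, hgD c, L]
        simp only [hc, and_true, if_pos]
        rw [getD_set, RL c hc, V c k hc hk]
        by_cases he : k = key.length - 1 - m
        · have h1 : key.length - 1 - m < key.length := by omega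
          have h3 : key.length - 1 - (key.length - 1 - m) = m := by omega
          simp only [he, h1, and_true, if_pos]
          rw [if_pos (by omega), h3]
        · have h4 : (key.length - (m+1) ≤ k) ↔ (key.length - m ≤ k) := by omega
          simp [he, h4]

def R90 (key : List (List Int)) : List (List Int) :=
  (List.range key.length).map (fun i =>
    (List.range key.length).map (fun j => (key.getD (key.length - 1 - j) []).getD i 0))


theorem rotate_90_eq_R90 (key : List (List Int)) : rotate_90 key = R90 key := by
  obtain ⟨L, RL, V⟩ := outer_char key key.length le_rfl
  have hr : rotate_90 key = F key key.length := rfl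
  rw [hr, R90]
  apply List.ext_getElem
  · simp [L]
  · intro i h1 h2
    have hi : i < key.length := by rwa [L] at h1
    rw [List.getElem_map, List.getElem_range]
    have hrowD : (F key key.length).getD i [] = (F key key.length)[i] :=
      List.getD_eq_getElem _ _ h1
    apply List.ext_getElem
    · have := RL i hi
      rw [hrowD] at this
      simp [this]
    · intro k hk1 hk2
      have hk : k < key.length := by simpa using hk2
      rw [List.getElem_map, List.getElem_range]
      have hv := V i k hi hk
      rw [hrowD, List.getD_eq_getElem _ _ hk1] at hv
      rw [hv, if_pos (by omega)]



theorem R90_of_form (n : Nat) (f : Nat → Nat → Int) :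
    R90 ((List.range n).map (fun i => (List.range n).map (f i)))
      = (List.range n).map (fun i => (List.range n).map (fun j => f (n - 1 - j) i)) := by
  have hL : ((List.range n).map (fun i => (List.range n).map (f i))).length = n := by simp
  unfold R90
  rw [hL]
  apply List.map_congr_left
  intro i hi
  have hi' : i < n := List.mem_range.mp hi
  apply List.map_congr_left
  intro j hj
  have hj' : j < n := List.mem_range.mp hj
  rw [getD_map_range _ _ _ _ (by omega), getD_map_range _ _ _ _ hi']

theorem R90_eq_form (key : List (List Int)) :
    R90 key = (List.range key.length).map (fun i =>
      (List.range key.length).map (fun j => (key.getD (key.length - 1 - j) []).getD i 0)) := rfl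

theorem R90_R90 (key : List (List Int)) :
    R90 (R90 key) = (List.range key.length).map (fun i =>
      (List.range key.length).map (fun j =>
        (key.getD (key.length - 1 - i) []).getD (key.length - 1 - j) 0)) := by
  rw [R90_eq_form key]
  exact R90_of_form key.length (fun i j => (key.getD (key.length - 1 - j) []).getD i 0)

theorem R90_R90_R90 (key : List (List Int)) :
    R90 (R90 (R90 key)) = (List.range key.length).map (fun i =>
      (List.range key.length).map (fun j =>
        (key.getD j []).getD (key.length - 1 - i) 0)) := by
  rw [R90_R90 key]
  rw [R90_of_form key.length
    (fun i j => (key.getD (key.length - 1 - i) []).getD (key.length - 1 - j) 0)]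
  apply List.map_congr_left
  intro i hi
  have hi' : i < key.length := List.mem_range.mp hi
  apply List.map_congr_left
  intro j hj
  have hj' : j < key.length := List.mem_range.mp hj
  have h : key.length - 1 - (key.length - 1 - j) = j := by omega
  rw [h]

theorem all_case_key_unfold (key : List (List Int)) :
    all_case_key key = [key, rotate_90 key, rotate_90 (rotate_90 key),
      rotate_90 (rotate_90 (rotate_90 key))] := rfl

-- ===== VERDICT (by name: the statement is the Claim_ definition above) =====
theorem all_case_key_spec : Claim_equal_all_case_key := by
  intro key _ _
  show all_case_key key = all_case_key_alt key
  rw [all_case_key_unfold, rotate_90_eq_R90, rotate_90_eq_R90, rotate_90_eq_R90,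
      R90_R90_R90, R90_R90]
  rfl
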